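-- pv_equiv track=rewrite | github.com/onealmond/hacking-lab | hsctf-2021/extended-fibonacci-sequence/fibonacci.py | calc
-- ===== SOURCE A (Python) =====
-- def calc(n):
--     mem = [0]*1000
--     mem[1] = 1
--     s = str(mem[1])
--     ret = int(s[-11:])
--     for i in range(2, n+1):
--         mem[i%len(mem)] = mem[(i-1) % len(mem)] + mem[(i-2) % len(mem)]
--         s += str(mem[i%len(mem)])
--         ret += int(s[-11:])
--     return int(str(ret)[-11:])
-- ===== SOURCE B (Python) =====
-- def calc(n):
--     # Two phases: while Fibonacci numbers are shorter than 11 digits the last-11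
--     # window of the running concatenation mixes several numbers, so keep it as a
--     # string; from fib(50) on every Fibonacci number has at least 11 digits, so
--     # the window is exactly fib(i) mod 10**11 zero-padded to 11 digits, and only
--     # the Fibonacci pair mod 10**11 needs to be tracked -- no big integers, no
--     # unbounded string.
--     M = 10 ** 11
--     a, b, win, ret = 0, 1, "1", 1
--     for i in range(2, min(n, 49) + 1):
--         a, b = b, a + b
--         win = (win + str(b))[-11:]
--         ret += int(win)
--     a, b = a % M, b % M
--     for i in range(50, n + 1):
--         a, b = b, (a + b) % M
--         win = str(b).zfill(11)
--         ret += int(win)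
--     return int(str(ret)[-11:])
-- ===== Notes on version B (the rewrite author's own statement) =====
-- stated objective: faster
-- what changed: Replaced A's 1000-slot circular buffer of exact (arbitrarily large) Fibonacci numbers and its unbounded running concatenation string by a two-phase algorithm: an exact 11-char sliding window for the 48 Fibonacci numbers shorter than 11 digits, then pure Fibonacci arithmetic mod 10^11 whose zero-padded 11-digit decimal IS the window, so no big integers and no growing string remain.
import Mathlib
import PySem

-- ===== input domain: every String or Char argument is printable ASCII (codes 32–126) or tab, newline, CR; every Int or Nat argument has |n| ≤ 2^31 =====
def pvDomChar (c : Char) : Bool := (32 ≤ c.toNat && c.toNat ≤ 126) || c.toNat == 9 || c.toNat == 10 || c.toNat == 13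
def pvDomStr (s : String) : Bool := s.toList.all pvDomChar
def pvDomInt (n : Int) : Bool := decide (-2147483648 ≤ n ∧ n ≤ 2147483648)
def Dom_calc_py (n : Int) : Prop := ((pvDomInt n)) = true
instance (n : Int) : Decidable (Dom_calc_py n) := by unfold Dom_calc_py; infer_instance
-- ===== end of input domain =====

-- B replaces A's quadratic scheme (1000-slot circular buffer of exact Fibonacci
-- numbers plus an unbounded concatenation string) by a two-phase algorithm: an
-- exact 11-char window for the 48 Fibonacci numbers shorter than 11 digits, then
-- pure Fibonacci arithmetic mod 10^11 with a zero-padded 11-digit window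
-- (objective: faster, asymptotic).

-- ===== PORT A =====
-- s[-11:] on a string, as both Pythons write it
def pyLast11 (l : List Char) : List Char := PySem.List.slice l (some (-11)) none

-- s[-11:] when the string s is stored reversed (see calcStepA below):
-- pyLast11Rev sRev = pyLast11 sRev.reverse (proved in pyLast11Rev_eq)
def pyLast11Rev (sRev : List Char) : List Char := (sRev.take 11).reverse

-- one iteration of A's for-loop; state = (mem, s, ret).  The concatenation
-- string s is STORED REVERSED (CPython's `s += …` is amortised O(1); a Lean
-- list append copies the left operand, so the literal representation would
-- make evaluation cubic); its value at every step is exactly A's s.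
def calcStepA (st : List Int × List Char × Int) (i : Int) : List Int × List Char × Int :=
  let mem := st.1
  let sRev := st.2.1
  let ret := st.2.2
  let v := PySem.List.pyGetD mem (PySem.Int.mod (i - 1) (mem.length : Int)) 0 +
           PySem.List.pyGetD mem (PySem.Int.mod (i - 2) (mem.length : Int)) 0
  let mem' := mem.set (PySem.Int.mod i (mem.length : Int)).toNat v
  -- s += str(mem[i % len(mem)])
  let sRev' := (PySem.Int.toChars (PySem.List.pyGetD mem' (PySem.Int.mod i (mem'.length : Int)) 0)).reverse ++ sRev
  -- ret += int(s[-11:])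
  let ret' := ret + (PySem.Int.ofChars? (pyLast11Rev sRev')).getD 0
  (mem', sRev', ret')

-- the three initialisation lines of A (s again stored reversed)
def calcInitA : List Int × List Char × Int :=
  let mem : List Int := (List.replicate 1000 (0 : Int)).set 1 1
  let sRev : List Char := (PySem.Int.toChars (PySem.List.pyGetD mem 1 0)).reverse
  (mem, sRev, (PySem.Int.ofChars? (pyLast11Rev sRev)).getD 0)

def calc_py (n : Int) : Int :=
  (PySem.Int.ofChars? (pyLast11 (PySem.Int.toChars
    (((PySem.List.pyRange 2 (n + 1)).foldl calcStepA calcInitA).2.2)))).getD 0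

-- ===== PORT B =====
-- one iteration of B's first loop (Fibonacci numbers shorter than 11 digits,
-- exact values, sliding window string); state = (a, b, win, ret)
def calcStepB1 (st : Int × Int × List Char × Int) (_i : Int) : Int × Int × List Char × Int :=
  let a := st.1
  let b := st.2.1
  let win := st.2.2.1
  let ret := st.2.2.2
  let b' := a + b
  let win' := pyLast11 (win ++ PySem.Int.toChars b')
  (b, b', win', ret + (PySem.Int.ofChars? win').getD 0)

-- one iteration of B's second loop (everything mod M = 10^11, window is the
-- zero-padded decimal of b); state = (a, b, ret)
def calcStepB2 (M : Int) (st : Int × Int × Int) (_i : Int) : Int × Int × Int :=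
  let a := st.1
  let b := st.2.1
  let ret := st.2.2
  let b' := PySem.Int.mod (a + b) M
  let win := PySem.Chars.zfill (PySem.Int.toChars b') 11
  (b, b', ret + (PySem.Int.ofChars? win).getD 0)

-- the initialisation line of B: a, b, win, ret = 0, 1, "1", 1
def calcInitB : Int × Int × List Char × Int := (0, 1, ['1'], 1)

def calc_py_alt (n : Int) : Int :=
  let M : Int := 10 ^ 11
  let st1 := (PySem.List.pyRange 2 (min n 49 + 1)).foldl calcStepB1 calcInitB
  let st2 := (PySem.List.pyRange 50 (n + 1)).foldl (calcStepB2 M)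
    (PySem.Int.mod st1.1 M, PySem.Int.mod st1.2.1 M, st1.2.2.2)
  (PySem.Int.ofChars? (pyLast11 (PySem.Int.toChars st2.2.2))).getD 0

-- ===== PRECONDITION & SPEC =====
def Spec_calc_py (n : Int) (out : Int) : Prop := out = calc_py_alt n
instance (n : Int) (out : Int) : Decidable (Spec_calc_py n out) := by unfold Spec_calc_py; infer_instance

-- ===== CLAIM (what is proved, stated in full; the proofs are below) =====
def Claim_equal_calc_py : Prop := ∀ (n : Int), Dom_calc_py n → Spec_calc_py n (calc_py n)

-- ===== LEMMAS AND PROOFS =====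

-- exact integer Fibonacci numbers
def fibI (k : Nat) : Int := (Nat.fib k : Int)

theorem fibI_add_two (k : Nat) : fibI (k + 2) = fibI k + fibI (k + 1) := by
  unfold fibI; push_cast [Nat.fib_add_two]; ring

-- every Fibonacci number from fib(50) on has at least 11 decimal digits
theorem fibI_ge_ten_pow (m : Nat) (h : 50 ≤ m) : (10 : Int) ^ 10 ≤ fibI m := by
  have h1 : Nat.fib 50 ≤ Nat.fib m := Nat.fib_mono h
  have h2 : (10 : Nat) ^ 10 ≤ Nat.fib 50 := by decide
  unfold fibI
  exact_mod_cast le_trans h2 h1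

-- the last 11 characters of a concatenation depend only on the last 11 characters of the left part
theorem pyLast11_append (x y : List Char) :
    pyLast11 (x ++ y) = pyLast11 (pyLast11 x ++ y) := by
  unfold pyLast11
  rw [PySem.List.slice_from_neg_ofNat _ 11 (by omega),
      PySem.List.slice_from_neg_ofNat _ 11 (by omega),
      PySem.List.slice_from_neg_ofNat _ 11 (by omega)]
  rw [List.drop_append, List.drop_append, List.drop_drop]
  simp only [List.length_append, List.length_drop]
  congr 2 <;> omega

-- the reversed-representation accessor computes exactly s[-11:]
theorem pyLast11Rev_eq (sRev : List Char) : pyLast11Rev sRev = pyLast11 sRev.reverse := by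
  unfold pyLast11Rev pyLast11
  rw [PySem.List.slice_from_neg_ofNat _ 11 (by omega)]
  rw [List.drop_reverse, List.length_reverse]
  by_cases h : sRev.length ≤ 11
  · rw [show sRev.length - (sRev.length - 11) = sRev.length by omega,
        List.take_length, List.take_of_length_le h]
  · rw [show sRev.length - (sRev.length - 11) = 11 by omega]

-- Python indexing into a just-updated / untouched slot of the circular buffer
theorem pyGetD_set_self (l : List Int) (idx : Int) (v : Int)
    (h0 : 0 ≤ idx) (h1 : idx < (l.length : Int)) :
    PySem.List.pyGetD (l.set idx.toNat v) idx 0 = v := by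
  rw [PySem.List.pyGetD_eq_getElem _ _ h0 (by simpa using h1)]
  exact List.getElem_set_self (by simp; omega)

theorem pyGetD_set_ne (l : List Int) (i j : Int) (v : Int)
    (hi0 : 0 ≤ i) (hj0 : 0 ≤ j) (hj1 : j < (l.length : Int)) (hne : i ≠ j) :
    PySem.List.pyGetD (l.set i.toNat v) j 0 = PySem.List.pyGetD l j 0 := by
  rw [PySem.List.pyGetD_eq_getElem _ _ hj0 (by simpa using hj1),
      PySem.List.pyGetD_eq_getElem _ _ hj0 (by simpa using hj1)]
  exact List.getElem_set_ne (by omega) _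

-- --- decimal-digit lemmas (base 10, Nat.toDigits) ---

-- splitting a decimal number at 10^e: the low part comes out zero-padded to e digits
theorem toDigits_split (e : Nat) (he : 1 ≤ e) :
    ∀ q r : Nat, 1 ≤ q → r < 10 ^ e →
    Nat.toDigits 10 (q * 10 ^ e + r) =
      Nat.toDigits 10 q ++
        (List.replicate (e - (Nat.toDigits 10 r).length) '0' ++ Nat.toDigits 10 r) := by
  induction e with
  | zero => omega
  | succ e ih =>
      intro q r hq hr
      by_cases he1 : e = 0
      · subst he1
        have hrd : Nat.toDigits 10 r = [r.digitChar] := Nat.toDigits_of_lt_base (by omega)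
        rw [hrd]
        have := (Nat.toDigits_append_toDigits (b := 10) (n := q) (d := r) (by omega) hq (by omega))
        rw [hrd] at this
        rw [show q * 10 ^ 1 + r = 10 * q + r by ring, ← this]
        simp
      · have he' : 1 ≤ e := by omega
        have hr' : r / 10 < 10 ^ e :=
          Nat.div_lt_of_lt_mul (lt_of_lt_of_eq hr (pow_succ' 10 e))
        have key : q * 10 ^ (e + 1) + r = 10 * (q * 10 ^ e + r / 10) + r % 10 := by
          have h10 : 10 * (r / 10) + r % 10 = r := by omega
          calc q * 10 ^ (e + 1) + r
              = 10 * (q * 10 ^ e) + (10 * (r / 10) + r % 10) := by rw [h10]; ring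
            _ = 10 * (q * 10 ^ e + r / 10) + r % 10 := by ring
        have hbig : ¬ q * 10 ^ (e + 1) + r < 10 := by
          have : 10 ≤ 10 ^ (e + 1) := by
            calc (10:Nat) = 10 ^ 1 := (pow_one 10).symm
            _ ≤ 10 ^ (e + 1) := Nat.pow_le_pow_right (by omega) (by omega)
          nlinarith
        have hqX : 0 < q * 10 ^ e := Nat.mul_pos (by omega) (by positivity)
        rw [key, Nat.toDigits_eq_if (by omega : 1 < 10), if_neg (by omega)]
        rw [show (10 * (q * 10 ^ e + r / 10) + r % 10) / 10 = q * 10 ^ e + r / 10 by omega,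
            show (10 * (q * 10 ^ e + r / 10) + r % 10) % 10 = r % 10 by omega]
        rw [ih he' q (r / 10) hq hr']
        by_cases hr10 : r < 10
        · have hr0 : r / 10 = 0 := by omega
          rw [hr0, Nat.toDigits_zero, Nat.toDigits_of_lt_base hr10,
              show r % 10 = r by omega]
          simp only [List.length_cons, List.length_nil]
          rw [show List.replicate (e + 1 - 1) '0' =
                List.replicate (e - 1) '0' ++ ['0'] by
              rw [← List.replicate_succ']; congr 1; omega]
          simp [List.append_assoc]
        · have hrd : Nat.toDigits 10 r =
              Nat.toDigits 10 (r / 10) ++ [(r % 10).digitChar] := by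
            rw [Nat.toDigits_eq_if (by omega : 1 < 10), if_neg (by omega)]
          rw [hrd]
          simp only [List.length_append, List.length_singleton, List.append_assoc]
          rw [show e + 1 - ((Nat.toDigits 10 (r / 10)).length + 1) =
                e - (Nat.toDigits 10 (r / 10)).length by omega]

-- zfill on a pure digit string is a plain left-pad with zeros
theorem zfill_digits (cs : List Char) (hne : cs ≠ [])
    (hd : ∀ c ∈ cs, c.isDigit = true) (w : Nat) :
    PySem.Chars.zfill cs (w : Int) = List.replicate (w - cs.length) '0' ++ cs := by
  unfold PySem.Chars.zfill
  by_cases hle : (w : Int) ≤ (cs.length : Int)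
  · rw [if_pos hle, show w - cs.length = 0 by omega]
    simp
  · rw [if_neg hle]
    cases cs with
    | nil => exact absurd rfl hne
    | cons c t =>
        have hcd : c.isDigit = true := hd c (by simp)
        have hns : ¬ (c = '+' ∨ c = '-') := by
          rintro (rfl | rfl) <;> simp [Char.isDigit] at hcd
        dsimp only
        rw [if_neg hns]
        simp

-- digit strings are nonempty and all digits
theorem toDigits_all_digits (k : Nat) : ∀ c ∈ Nat.toDigits 10 k, c.isDigit = true :=
  fun _c hc => Nat.isDigit_of_mem_toDigits (by omega) (by omega) hc

-- THE KEY LEMMA: once a number has at least 11 digits, the last 11 characters of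
-- any concatenation ending in it are its value mod 10^11, zero-padded to 11 digits
theorem last11_toDigits (k : Nat) (hk : 10 ^ 10 ≤ k) (x : List Char) :
    pyLast11 (x ++ Nat.toDigits 10 k) =
      PySem.Chars.zfill (Nat.toDigits 10 (k % 10 ^ 11)) (11 : Int) := by
  have hne : Nat.toDigits 10 (k % 10 ^ 11) ≠ [] := by
    have := Nat.length_toDigits_pos (b := 10) (n := k % 10 ^ 11)
    intro h; rw [h] at this; simp at this
  have hlenr : (Nat.toDigits 10 (k % 10 ^ 11)).length ≤ 11 :=
    (Nat.length_toDigits_le_iff (by omega) (by omega)).2 (Nat.mod_lt _ (by positivity))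
  rw [show ((11 : Int)) = ((11 : Nat) : Int) by norm_num,
      zfill_digits _ hne (toDigits_all_digits _) 11]
  unfold pyLast11
  rw [PySem.List.slice_from_neg_ofNat _ 11 (by omega)]
  by_cases hq : k < 10 ^ 11
  · have hkr : k % 10 ^ 11 = k := Nat.mod_eq_of_lt hq
    have hlen11 : (Nat.toDigits 10 k).length = 11 := by
      have h1 : (Nat.toDigits 10 k).length ≤ 11 :=
        (Nat.length_toDigits_le_iff (by omega) (by omega)).2 hq
      have h2 : ¬ (Nat.toDigits 10 k).length ≤ 10 := by
        rw [Nat.length_toDigits_le_iff (by omega) (by omega)]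
        omega
      omega
    rw [hkr, show 11 - (Nat.toDigits 10 k).length = 0 by omega]
    simp only [List.replicate_zero, List.nil_append, List.length_append, hlen11]
    rw [show x.length + 11 - 11 = x.length by omega]
    simp
  · have hq1 : 1 ≤ k / 10 ^ 11 := by
      have : 10 ^ 11 ≤ k := by omega
      exact Nat.one_le_div_iff (by positivity) |>.2 this
    have hsplit := toDigits_split 11 (by omega) (k / 10 ^ 11) (k % 10 ^ 11) hq1
      (Nat.mod_lt _ (by positivity))
    rw [show k / 10 ^ 11 * 10 ^ 11 + k % 10 ^ 11 = k by omega] at hsplit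
    rw [hsplit]
    have hpadlen : (List.replicate (11 - (Nat.toDigits 10 (k % 10 ^ 11)).length) '0' ++
        Nat.toDigits 10 (k % 10 ^ 11)).length = 11 := by
      simp only [List.length_append, List.length_replicate]
      omega
    rw [show x ++ (Nat.toDigits 10 (k / 10 ^ 11) ++
          (List.replicate (11 - (Nat.toDigits 10 (k % 10 ^ 11)).length) '0' ++
            Nat.toDigits 10 (k % 10 ^ 11))) =
        (x ++ Nat.toDigits 10 (k / 10 ^ 11)) ++
          (List.replicate (11 - (Nat.toDigits 10 (k % 10 ^ 11)).length) '0' ++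
            Nat.toDigits 10 (k % 10 ^ 11)) by simp [List.append_assoc]]
    rw [List.length_append, hpadlen,
        show (x ++ Nat.toDigits 10 (k / 10 ^ 11)).length + 11 - 11 =
          (x ++ Nat.toDigits 10 (k / 10 ^ 11)).length by omega,
        List.drop_left]

-- the same fact lifted to Int: toChars and mod
theorem last11_toChars (m : Int) (hm : (10 : Int) ^ 10 ≤ m) (x : List Char) :
    pyLast11 (x ++ PySem.Int.toChars m) =
      PySem.Chars.zfill (PySem.Int.toChars (PySem.Int.mod m (10 ^ 11))) 11 := by
  obtain ⟨k, rfl⟩ : ∃ k : Nat, m = (k : Int) := ⟨m.toNat, by omega⟩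
  have hk : 10 ^ 10 ≤ k := by exact_mod_cast hm
  have hmod : PySem.Int.mod (k : Int) (10 ^ 11) = ((k % 10 ^ 11 : Nat) : Int) := by
    rw [show ((10 : Int) ^ 11) = (((10 ^ 11 : Nat) : Int)) by norm_num]
    exact PySem.Int.mod_natCast _ _
  have h1 : PySem.Int.toChars (k : Int) = Nat.toDigits 10 k := by
    simp only [PySem.Int.toChars, Int.toNat_natCast,
      if_neg (show ¬ ((k : Int) < 0) by omega)]
  have h2 : PySem.Int.toChars ((k % 10 ^ 11 : Nat) : Int) =
      Nat.toDigits 10 (k % 10 ^ 11) := by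
    simp only [PySem.Int.toChars, Int.toNat_natCast,
      if_neg (show ¬ (((k % 10 ^ 11 : Nat) : Int) < 0) by omega)]
  rw [hmod, h1, h2, last11_toDigits k hk x]

-- ---- phase 1: A's loop versus B's first loop ----

-- invariant tying A's loop state after processing i = 2 .. m+1 to B's first-loop state
def calcInv (m : Nat) (A : List Int × List Char × Int) (B : Int × Int × List Char × Int) : Prop :=
  A.1.length = 1000 ∧
  PySem.List.pyGetD A.1 (PySem.Int.mod (m : Int) 1000) 0 = fibI m ∧
  PySem.List.pyGetD A.1 (PySem.Int.mod ((m : Int) + 1) 1000) 0 = fibI (m + 1) ∧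
  B.1 = fibI m ∧
  B.2.1 = fibI (m + 1) ∧
  B.2.2.1 = pyLast11Rev A.2.1 ∧
  B.2.2.2 = A.2.2

theorem calc_step_inv (m : Nat) (A : List Int × List Char × Int)
    (B : Int × Int × List Char × Int) (h : calcInv m A B) :
    calcInv (m + 1) (calcStepA A (2 + (m : Int))) (calcStepB1 B (2 + (m : Int))) := by
  obtain ⟨hlen, h0, h1, ha, hb, hwin, hret⟩ := h
  have hlenI : (A.1.length : Int) = 1000 := by exact_mod_cast hlen
  have e1 : (2 + (m : Int)) - 1 = (m : Int) + 1 := by ring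
  have e2 : (2 + (m : Int)) - 2 = (m : Int) := by ring
  have hmne : PySem.Int.mod (2 + (m : Int)) 1000 ≠ PySem.Int.mod ((m : Int) + 1) 1000 := by
    rw [PySem.Int.mod_eq_emod_of_pos (by omega), PySem.Int.mod_eq_emod_of_pos (by omega)]
    omega
  have hset0 : 0 ≤ PySem.Int.mod (2 + (m : Int)) 1000 := PySem.Int.mod_nonneg _ (by omega)
  have hset1 : PySem.Int.mod (2 + (m : Int)) 1000 < 1000 := PySem.Int.mod_lt _ (by omega)
  have hlk0 : 0 ≤ PySem.Int.mod ((m : Int) + 1) 1000 := PySem.Int.mod_nonneg _ (by omega)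
  have hlk1 : PySem.Int.mod ((m : Int) + 1) 1000 < 1000 := PySem.Int.mod_lt _ (by omega)
  unfold calcStepA calcStepB1 calcInv
  dsimp only
  rw [hlenI, e1, e2]
  rw [List.length_set, hlenI]
  have hv : PySem.List.pyGetD
      (A.1.set (PySem.Int.mod (2 + (m : Int)) 1000).toNat
        (PySem.List.pyGetD A.1 (PySem.Int.mod ((m : Int) + 1) 1000) 0 +
         PySem.List.pyGetD A.1 (PySem.Int.mod ((m : Int)) 1000) 0))
      (PySem.Int.mod (2 + (m : Int)) 1000) 0 =
      PySem.List.pyGetD A.1 (PySem.Int.mod ((m : Int) + 1) 1000) 0 +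
      PySem.List.pyGetD A.1 (PySem.Int.mod ((m : Int)) 1000) 0 :=
    pyGetD_set_self _ _ _ hset0 (by omega)
  rw [hv, h0, h1]
  refine ⟨by simp [hlen], ?_, ?_, hb, ?_, ?_, ?_⟩
  · push_cast
    rw [pyGetD_set_ne _ _ _ _ hset0 hlk0 (by omega) hmne, h1]
  · have e3 : ((m : Int) + 1) + 1 = 2 + (m : Int) := by ring
    push_cast
    rw [e3, pyGetD_set_self _ _ _ hset0 (by omega)]
    rw [show (m + 1 + 1) = m + 2 by omega, fibI_add_two]
    ring
  · rw [ha, hb]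
    rw [show (m + 1 + 1) = m + 2 by omega, fibI_add_two]
  · rw [ha, hb, hwin, show fibI m + fibI (m + 1) = fibI (m + 1) + fibI m from by ring]
    rw [pyLast11Rev_eq, pyLast11Rev_eq, List.reverse_append, List.reverse_reverse]
    exact (pyLast11_append _ _).symm
  · rw [hret, ha, hb, hwin, show fibI m + fibI (m + 1) = fibI (m + 1) + fibI m from by ring]
    rw [pyLast11Rev_eq, pyLast11Rev_eq, List.reverse_append, List.reverse_reverse,
        ← pyLast11_append]

set_option maxRecDepth 40000 in
theorem calc_base_inv : calcInv 0 calcInitA calcInitB := by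
  refine ⟨by simp [calcInitA], by decide, by decide, by decide, by decide, by decide, by decide⟩

theorem calc_loop_inv (m : Nat) :
    calcInv m
      ((PySem.List.pyRange 2 (2 + (m : Int))).foldl calcStepA calcInitA)
      ((PySem.List.pyRange 2 (2 + (m : Int))).foldl calcStepB1 calcInitB) := by
  induction m with
  | zero =>
      have h : PySem.List.pyRange 2 (2 + ((0 : Nat) : Int)) = [] := by
        simp [PySem.List.pyRange]
      rw [h]
      exact calc_base_inv
  | succ k ih =>
      have h : PySem.List.pyRange 2 (2 + ((k + 1 : Nat) : Int)) =
          PySem.List.pyRange 2 (2 + (k : Int)) ++ [2 + (k : Int)] := by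
        rw [show (2 : Int) + ((k + 1 : Nat) : Int) = (2 + (k : Int)) + 1 by push_cast; ring]
        exact PySem.List.pyRange_one_succ_right (by omega)
      rw [h, List.foldl_append, List.foldl_append]
      simp only [List.foldl_cons, List.foldl_nil]
      exact calc_step_inv k _ _ ih

-- ---- phase 2: A's loop versus B's second (modular) loop ----

-- invariant tying A's loop state after processing i = 2 .. m+1 (m ≥ 48) to B's
-- second-loop state
def calcInv2 (m : Nat) (A : List Int × List Char × Int) (B : Int × Int × Int) : Prop :=
  A.1.length = 1000 ∧
  PySem.List.pyGetD A.1 (PySem.Int.mod (m : Int) 1000) 0 = fibI m ∧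
  PySem.List.pyGetD A.1 (PySem.Int.mod ((m : Int) + 1) 1000) 0 = fibI (m + 1) ∧
  B.1 = PySem.Int.mod (fibI m) (10 ^ 11) ∧
  B.2.1 = PySem.Int.mod (fibI (m + 1)) (10 ^ 11) ∧
  B.2.2 = A.2.2

theorem calc_step_inv2 (m : Nat) (h48 : 48 ≤ m) (A : List Int × List Char × Int)
    (B : Int × Int × Int) (h : calcInv2 m A B) :
    calcInv2 (m + 1) (calcStepA A (2 + (m : Int))) (calcStepB2 (10 ^ 11) B (2 + (m : Int))) := by
  obtain ⟨hlen, h0, h1, ha, hb, hret⟩ := h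
  have hlenI : (A.1.length : Int) = 1000 := by exact_mod_cast hlen
  have e1 : (2 + (m : Int)) - 1 = (m : Int) + 1 := by ring
  have e2 : (2 + (m : Int)) - 2 = (m : Int) := by ring
  have hmne : PySem.Int.mod (2 + (m : Int)) 1000 ≠ PySem.Int.mod ((m : Int) + 1) 1000 := by
    rw [PySem.Int.mod_eq_emod_of_pos (by omega), PySem.Int.mod_eq_emod_of_pos (by omega)]
    omega
  have hset0 : 0 ≤ PySem.Int.mod (2 + (m : Int)) 1000 := PySem.Int.mod_nonneg _ (by omega)
  have hset1 : PySem.Int.mod (2 + (m : Int)) 1000 < 1000 := PySem.Int.mod_lt _ (by omega)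
  have hlk0 : 0 ≤ PySem.Int.mod ((m : Int) + 1) 1000 := PySem.Int.mod_nonneg _ (by omega)
  have hlk1 : PySem.Int.mod ((m : Int) + 1) 1000 < 1000 := PySem.Int.mod_lt _ (by omega)
  unfold calcStepA calcStepB2 calcInv2
  dsimp only
  rw [hlenI, e1, e2]
  rw [List.length_set, hlenI]
  have hv : PySem.List.pyGetD
      (A.1.set (PySem.Int.mod (2 + (m : Int)) 1000).toNat
        (PySem.List.pyGetD A.1 (PySem.Int.mod ((m : Int) + 1) 1000) 0 +
         PySem.List.pyGetD A.1 (PySem.Int.mod ((m : Int)) 1000) 0))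
      (PySem.Int.mod (2 + (m : Int)) 1000) 0 =
      PySem.List.pyGetD A.1 (PySem.Int.mod ((m : Int) + 1) 1000) 0 +
      PySem.List.pyGetD A.1 (PySem.Int.mod ((m : Int)) 1000) 0 :=
    pyGetD_set_self _ _ _ hset0 (by omega)
  rw [hv, h0, h1]
  have hfibsum : fibI (m + 1) + fibI m = fibI (m + 2) := by
    rw [fibI_add_two]; ring
  -- B's new Fibonacci residue equals fib(m+2) mod 10^11
  have hmodsum : PySem.Int.mod
      (PySem.Int.mod (fibI m) (10 ^ 11) + PySem.Int.mod (fibI (m + 1)) (10 ^ 11)) (10 ^ 11) =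
      PySem.Int.mod (fibI (m + 2)) (10 ^ 11) := by
    rw [PySem.Int.mod_eq_emod_of_pos (by positivity), PySem.Int.mod_eq_emod_of_pos (by positivity),
        PySem.Int.mod_eq_emod_of_pos (by positivity), PySem.Int.mod_eq_emod_of_pos (by positivity)]
    rw [← Int.add_emod, ← fibI_add_two]
  -- A's new term equals B's new term: the tail window is fib(m+2) mod 10^11 padded
  have hterm : pyLast11Rev ((PySem.Int.toChars (fibI (m + 1) + fibI m)).reverse ++ A.2.1) =
      PySem.Chars.zfill (PySem.Int.toChars (PySem.Int.mod (fibI (m + 2)) (10 ^ 11))) 11 := by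
    rw [pyLast11Rev_eq, List.reverse_append, List.reverse_reverse, hfibsum]
    exact last11_toChars _ (fibI_ge_ten_pow (m + 2) (by omega)) _
  refine ⟨by simp [hlen], ?_, ?_, ?_, ?_, ?_⟩
  · push_cast
    rw [pyGetD_set_ne _ _ _ _ hset0 hlk0 (by omega) hmne, h1]
  · have e3 : ((m : Int) + 1) + 1 = 2 + (m : Int) := by ring
    push_cast
    rw [e3, pyGetD_set_self _ _ _ hset0 (by omega)]
    rw [show (m + 1 + 1) = m + 2 by omega, fibI_add_two]
    ring
  · rw [hb]
  · rw [ha, hb, hmodsum, show (m + 1 + 1) = m + 2 by omega]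
  · rw [hret, ha, hb, hmodsum, hterm]

theorem calc_loop_inv2 (m : Nat) :
    calcInv2 (48 + m)
      ((PySem.List.pyRange 2 (2 + ((48 + m : Nat) : Int))).foldl calcStepA calcInitA)
      ((PySem.List.pyRange 50 (2 + ((48 + m : Nat) : Int))).foldl (calcStepB2 (10 ^ 11))
        (let st1 := (PySem.List.pyRange 2 50).foldl calcStepB1 calcInitB
         (PySem.Int.mod st1.1 (10 ^ 11), PySem.Int.mod st1.2.1 (10 ^ 11), st1.2.2.2))) := by
  induction m with
  | zero =>
      rw [show (48 + 0 : Nat) = 48 by norm_num,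
          show (2 : Int) + ((48 : Nat) : Int) = 50 by norm_num]
      have h2 : PySem.List.pyRange 50 (50 : Int) = [] := by
        simp [PySem.List.pyRange]
      rw [h2]
      have h1 := calc_loop_inv 48
      rw [show (2 : Int) + ((48 : Nat) : Int) = 50 by norm_num] at h1
      obtain ⟨hlen, h0, hone, ha, hb, _, hret⟩ := h1
      simp only [List.foldl_nil]
      exact ⟨hlen, h0, hone, by dsimp only; rw [ha], by dsimp only; rw [hb],
        by dsimp only; rw [hret]⟩
  | succ k ih =>
      have hsucc : (2 : Int) + ((48 + (k + 1) : Nat) : Int) =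
          (2 + ((48 + k : Nat) : Int)) + 1 := by push_cast; ring
      have hA : PySem.List.pyRange 2 (2 + ((48 + (k + 1) : Nat) : Int)) =
          PySem.List.pyRange 2 (2 + ((48 + k : Nat) : Int)) ++ [2 + ((48 + k : Nat) : Int)] := by
        rw [hsucc]
        exact PySem.List.pyRange_one_succ_right (by push_cast; omega)
      have hB : PySem.List.pyRange 50 (2 + ((48 + (k + 1) : Nat) : Int)) =
          PySem.List.pyRange 50 (2 + ((48 + k : Nat) : Int)) ++ [2 + ((48 + k : Nat) : Int)] := by
        rw [hsucc]
        exact PySem.List.pyRange_one_succ_right (by push_cast; omega)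
      rw [hA, hB, List.foldl_append, List.foldl_append]
      simp only [List.foldl_cons, List.foldl_nil]
      rw [show (48 + (k + 1) : Nat) = (48 + k) + 1 from rfl]
      exact calc_step_inv2 (48 + k) (by omega) _ _ ih

-- ===== VERDICT (by name: the statement is the Claim_ definition above) =====
set_option maxRecDepth 40000 in
theorem calc_py_spec : Claim_equal_calc_py := by
  intro n _
  unfold Spec_calc_py calc_py calc_py_alt
  dsimp only
  by_cases hn : n ≤ 49
  · -- phase 2 never runs; B's first loop covers the same range as A's loop
    have hmin : min n 49 = n := min_eq_left hn
    have h2 : PySem.List.pyRange 50 (n + 1) = [] := by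
      simp [PySem.List.pyRange]
      omega
    rw [hmin, h2]
    simp only [List.foldl_nil]
    by_cases hn2 : n + 1 ≤ 2
    · have h : PySem.List.pyRange 2 (n + 1) = [] := by
        simp [PySem.List.pyRange, hn2]
      rw [h]
      simp only [List.foldl_nil]
      rw [show calcInitA.2.2 = calcInitB.2.2.2 from by decide]
    · have hm : (2 : Int) + (((n - 1).toNat : Nat) : Int) = n + 1 := by omega
      have hinv := calc_loop_inv (n - 1).toNat
      rw [hm] at hinv
      obtain ⟨-, -, -, -, -, -, hret⟩ := hinv
      rw [hret]
  · -- n ≥ 50: split A's range at 50, use the phase-2 invariant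
    have hmin : min n 49 = 49 := min_eq_right (by omega)
    have hm : (2 : Int) + (((n - 49).toNat + 48 : Nat) : Int) = n + 1 := by omega
    have hinv := calc_loop_inv2 (n - 49).toNat
    rw [show (48 + (n - 49).toNat : Nat) = ((n - 49).toNat + 48 : Nat) by omega, hm] at hinv
    obtain ⟨-, -, -, -, -, hret⟩ := hinv
    rw [hmin, show (49 : Int) + 1 = 50 by norm_num]
    rw [hret]
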